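-- pv_equiv track=rewrite | github.com/DarshanKappa/chatbox2 | ChatBOX_BE/chats/apis.py | round_to_zero
-- ===== SOURCE A (Python) =====
-- def round_to_zero(binary_as_str):
--     counter = 0
--     second_counter = 0
--     for i in range(8, len(binary_as_str) + 1):
--         if len(binary_as_str) < 8:
--             return binary_as_str
--         else:
--             if i % 8 == 0:  # 8
--                 counter += 8
--             else:  # 9, 10, 11
--                 counter += 1
--                 second_counter += 1  # 1, 2, 3
--     rounded = counter + (8 - second_counter)  # 11
--     return rounded
-- ===== SOURCE B (Python) =====
-- def round_to_zero(binary_as_str):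
--     return 8 * (len(binary_as_str) // 8 + 1)
-- ===== Notes on version B (the rewrite author's own statement) =====
-- stated objective: faster
-- what changed: Replaces the counting loop over range(8, len+1) (whose early-return branch is unreachable) by the closed form 8*(len//8 + 1).
import Mathlib
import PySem

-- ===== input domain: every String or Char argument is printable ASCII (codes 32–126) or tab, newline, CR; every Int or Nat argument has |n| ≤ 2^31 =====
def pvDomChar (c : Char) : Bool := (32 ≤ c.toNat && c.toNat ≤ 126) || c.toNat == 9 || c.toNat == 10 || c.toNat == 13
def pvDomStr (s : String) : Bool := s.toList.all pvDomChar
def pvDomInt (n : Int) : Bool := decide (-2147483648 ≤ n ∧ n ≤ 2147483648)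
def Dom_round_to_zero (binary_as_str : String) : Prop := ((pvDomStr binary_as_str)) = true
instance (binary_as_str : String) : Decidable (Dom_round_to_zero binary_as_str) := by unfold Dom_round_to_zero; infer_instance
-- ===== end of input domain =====

-- B replaces A's O(n) counting loop by the closed form 8*(len//8 + 1); A's early-return-the-string
-- branch is unreachable (the loop body only runs when len ≥ 8), so A always returns an int.

-- ===== PORT A =====
-- loop state: Sum.inl v = "already returned v" (the early `return binary_as_str`, dead code),
-- Sum.inr (counter, second_counter) = the two running counters
def aStep (binary_as_str : String) (n : Int) (st : Sum String (Int × Int)) (i : Int) :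
    Sum String (Int × Int) :=
  match st with
  | Sum.inl v => Sum.inl v
  | Sum.inr (counter, second_counter) =>
    if n < 8 then Sum.inl binary_as_str
    else if PySem.Int.mod i 8 = 0 then Sum.inr (counter + 8, second_counter)
    else Sum.inr (counter + 1, second_counter + 1)

def round_to_zero (binary_as_str : String) : Int :=
  match (PySem.List.pyRange 8 (PySem.Str.len binary_as_str + 1) 1).foldl
      (aStep binary_as_str (PySem.Str.len binary_as_str))
      (Sum.inr ((0 : Int), (0 : Int))) with
  | Sum.inl _ => 0  -- unreachable: in the Python this would return the string; the loop body never runs with len < 8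
  | Sum.inr (counter, second_counter) => counter + (8 - second_counter)

-- ===== PORT B =====
def round_to_zero_alt (binary_as_str : String) : Int :=
  8 * (PySem.Int.floordiv (PySem.Str.len binary_as_str) 8 + 1)

-- ===== PRECONDITION & SPEC =====
def Spec_round_to_zero (binary_as_str : String) (out : Int) : Prop := out = round_to_zero_alt binary_as_str
instance (binary_as_str : String) (out : Int) : Decidable (Spec_round_to_zero binary_as_str out) := by unfold Spec_round_to_zero; infer_instance

-- ===== CLAIM (what is proved, stated in full; the proofs are below) =====
def Claim_equal_round_to_zero : Prop := ∀ (binary_as_str : String), Dom_round_to_zero binary_as_str → Spec_round_to_zero binary_as_str (round_to_zero binary_as_str)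

-- ===== LEMMAS AND PROOFS =====

-- loop invariant: after processing i = 8 .. 7+k, counter = 8*q + r and second_counter = r,
-- where q = (7+k)/8 multiples of 8 were seen and r = k - q non-multiples
lemma loop_inv (s : String) (n : Int) (hn : ¬ n < 8) (k : Nat) :
    (PySem.List.pyRange 8 ((7 + (k : Int)) + 1) 1).foldl (aStep s n)
        (Sum.inr ((0 : Int), (0 : Int)))
      = Sum.inr (8 * ((7 + (k : Int)) / 8) + ((7 + (k : Int)) - 7 - (7 + (k : Int)) / 8),
                 (7 + (k : Int)) - 7 - (7 + (k : Int)) / 8) := by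
  induction k with
  | zero =>
    rw [PySem.List.pyRange_one_eq_nil (by omega)]
    norm_num
  | succ k ih =>
    have h : (7 + ((k + 1 : Nat) : Int)) + 1 = ((7 + (k : Int)) + 1) + 1 := by push_cast; ring
    rw [h, PySem.List.pyRange_one_succ_right (by omega), List.foldl_append, ih]
    simp only [List.foldl_cons, List.foldl_nil, aStep, if_neg hn]
    rw [show PySem.Int.mod (7 + (k : Int) + 1) 8 = (7 + (k : Int) + 1) % 8 from
      PySem.Int.mod_eq_emod_of_pos (by norm_num)]
    have hk : (7 + ((k + 1 : Nat) : Int)) = (7 + (k : Int)) + 1 := by push_cast; ring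
    rw [hk]
    by_cases hm : ((7 + (k : Int)) + 1) % 8 = 0
    · rw [if_pos hm]
      simp only [Sum.inr.injEq, Prod.mk.injEq]
      omega
    · rw [if_neg hm]
      simp only [Sum.inr.injEq, Prod.mk.injEq]
      omega

-- ===== VERDICT (by name: the statement is the Claim_ definition above) =====
theorem round_to_zero_spec : Claim_equal_round_to_zero := by
  intro s _
  unfold Spec_round_to_zero round_to_zero round_to_zero_alt
  have h0 : (0 : Int) ≤ PySem.Str.len s := by simp [PySem.Str.len_eq]
  generalize hn : PySem.Str.len s = n at *
  rw [PySem.Int.floordiv_eq_ediv_of_pos (by norm_num)]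
  by_cases h8 : n < 8
  · rw [PySem.List.pyRange_one_eq_nil (by omega)]
    simp only [List.foldl_nil]
    omega
  · obtain ⟨k, hk⟩ : ∃ k : Nat, n = 7 + (k : Int) := ⟨(n - 7).toNat, by omega⟩
    subst hk
    rw [loop_inv s _ h8 k]
    dsimp only
    omega
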